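-- pv_equiv track=rewrite | github.com/emelcansu/MarketingCampaignSelector | DynamicCRM/code.py | assign_customers_to_representatives
-- ===== SOURCE A (Python) =====
-- def assign_customers_to_representatives(customers, representatives, availability):
--     """
--     Zaman Karmaşıklığı: O(n * m)
--     Burada n, müşteri sayısını, m ise temsilci sayısını ifade eder.
--     Kodda her müşteri için tüm temsilciler kontrol edilerek en yakın temsilci seçilir, bu da O(n * m) zaman karmaşıklığına yol açar.
--
--     Uzay Karmaşıklığı: O(n)
--     Kodda yalnızca müşteri-temsilci eşleşmelerini tutan bir liste ve temsilcilerin kullanım durumu için bir set kullanılıyor.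
--     Bu nedenle uzay karmaşıklığı O(n) olur, çünkü sadece müşteri sayısı kadar veri saklanır.
--     """
--
--     n = len(customers)
--     m = len(representatives)
--     used_representatives = set()
--     assignments = []
--     total_distance = 0
--
--     for customer in customers:
--         min_distance = float('inf')
--         assigned_rep = None
--         for idx, rep in enumerate(representatives):
--             if availability[idx] and idx not in used_representatives:
--                 distance = abs(customer - rep)
--                 if distance < min_distance:
--                     min_distance = distance
--                     assigned_rep = idx
--         if assigned_rep is not None:
--             assignments.append((customer, representatives[assigned_rep]))
--             total_distance += min_distance
--             used_representatives.add(assigned_rep)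
--
--     return total_distance, assignments
-- ===== SOURCE B (Python) =====
-- import bisect
--
-- def assign_customers_to_representatives(customers, representatives, availability):
--     # Sorted pool of available reps as parallel lists: vals (values) and pool ((value, index)).
--     pool = []
--     vals = []
--     for idx, rep in enumerate(representatives):
--         if availability[idx]:
--             k = bisect.bisect_right(vals, rep)
--             vals.insert(k, rep)
--             pool.insert(k, (rep, idx))
--     total = 0
--     assignments = []
--     for c in customers:
--         if not pool:
--             continue
--         j = bisect.bisect_left(vals, c)
--         best = None
--         if j < len(pool):
--             best = (vals[j] - c, pool[j][1], j)
--         if j > 0: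
--             k = bisect.bisect_left(vals, vals[j - 1])
--             cand = (c - vals[k], pool[k][1], k)
--             if best is None or (cand[0], cand[1]) < (best[0], best[1]):
--                 best = cand
--         d, i, k = best
--         total += d
--         assignments.append((c, vals[k]))
--         vals.pop(k)
--         pool.pop(k)
--     return total, assignments
-- ===== Notes on version B (the rewrite author's own statement) =====
-- stated objective: faster
-- what changed: Instead of scanning all representatives per customer with an availability/used check, B builds one sorted pool of available representatives (insertion via bisect) and serves each customer by binary-searching the nearest value (predecessor/successor candidates, index tie-break) and deleting the chosen entry.
-- outside the precondition, e.g. on assign_customers_to_representatives([], [1], []): A returns (0, []), B raises IndexError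
import Mathlib
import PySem

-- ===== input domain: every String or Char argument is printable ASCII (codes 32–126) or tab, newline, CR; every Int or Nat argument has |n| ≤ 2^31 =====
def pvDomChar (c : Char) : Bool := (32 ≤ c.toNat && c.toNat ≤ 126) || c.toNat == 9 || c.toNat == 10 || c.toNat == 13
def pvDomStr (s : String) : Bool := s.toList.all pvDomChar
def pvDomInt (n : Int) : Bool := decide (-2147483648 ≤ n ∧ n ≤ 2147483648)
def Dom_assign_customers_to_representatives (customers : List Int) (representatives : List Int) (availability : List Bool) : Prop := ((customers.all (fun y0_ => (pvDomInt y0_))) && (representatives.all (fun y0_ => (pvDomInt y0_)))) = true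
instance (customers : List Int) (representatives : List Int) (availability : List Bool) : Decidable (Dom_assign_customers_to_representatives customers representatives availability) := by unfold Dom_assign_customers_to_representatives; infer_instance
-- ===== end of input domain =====

-- B replaces A's per-customer scan of all representatives by one sorted pool of the available
-- representatives, served by binary search (nearest value, index tie-break) with deletion on use;
-- objective: faster.

-- ===== PORT A =====
-- A's loop body: inner scan over enumerate(representatives) keeping (min_distance, assigned_rep)
-- (state 'none' = (inf, None)), then the conditional assignment/total update.
def pvStepA (representatives : List Int) (availability : List Bool)
    (st : PySem.Set Int × List (Int × Int) × Int) (c : Int) :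
    PySem.Set Int × List (Int × Int) × Int :=
  let best := (PySem.List.enumerate representatives 0).foldl
    (fun (best : Option (Int × Int)) p =>
      if PySem.List.pyGetD availability p.1 false && !(PySem.Set.contains st.1 p.1) then
        match best with
        | none => some (|c - p.2|, p.1)
        | some b => if |c - p.2| < b.1 then some (|c - p.2|, p.1) else some b
      else best) none
  match best with
  | none => st
  | some b => (PySem.Set.add st.1 b.2, st.2.1 ++ [(c, PySem.List.pyGetD representatives b.2 0)], st.2.2 + b.1)

def assign_customers_to_representatives (customers : List Int) (representatives : List Int) (availability : List Bool) : Int × (List (Int × Int)) :=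
  let fin := customers.foldl (pvStepA representatives availability) (PySem.Set.empty, ([], 0))
  (fin.2.2, fin.2.1)

-- ===== PORT B =====
-- B's successor candidate at j = bisect_left(vals, c) (as in Source B; 'none' = no candidate).
def pvBest0 (vals : List Int) (pool : List (Int × Int)) (c : Int) (j : Nat) : Option (Int × Int × Nat) :=
  match vals[j]?, pool[j]? with
  | some vj, some pj => some (vj - c, pj.2, j)
  | _, _ => none

-- B's per-customer search: successor candidate, then predecessor candidate at the head of the
-- value group of vals[j-1]; result (distance, rep index, pool position).
def pvPick (vals : List Int) (pool : List (Int × Int)) (c : Int) : Option (Int × Int × Nat) :=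
  let j := PySem.List.bisectLeft vals c
  if j = 0 then pvBest0 vals pool c j
  else
    match vals[j-1]? with
    | none => pvBest0 vals pool c j
    | some vp =>
      let k := PySem.List.bisectLeft vals vp
      match vals[k]?, pool[k]? with
      | some vk, some pk =>
        match pvBest0 vals pool c j with
        | none => some (c - vk, pk.2, k)
        | some b => if c - vk < b.1 ∨ (c - vk = b.1 ∧ pk.2 < b.2.1) then some (c - vk, pk.2, k) else some b
      | _, _ => pvBest0 vals pool c j

-- B's build loop: parallel sorted lists (vals, pool) by insertion at bisect_right.
def pvInit (representatives : List Int) (availability : List Bool) : List Int × List (Int × Int) :=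
  (PySem.List.enumerate representatives 0).foldl
    (fun (vp : List Int × List (Int × Int)) p =>
      if PySem.List.pyGetD availability p.1 false then
        let k := PySem.List.bisectRight vp.1 p.2
        (PySem.List.insert vp.1 (k : Int) p.2, PySem.List.insert vp.2 (k : Int) (p.2, p.1))
      else vp) ([], [])

-- B's serve loop body.
def pvStepB (st : List Int × List (Int × Int) × List (Int × Int) × Int) (c : Int) :
    List Int × List (Int × Int) × List (Int × Int) × Int :=
  if st.2.1.isEmpty then st
  else
    match pvPick st.1 st.2.1 c with
    | none => st
    | some b =>
      (st.1.eraseIdx b.2.2, st.2.1.eraseIdx b.2.2,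
       st.2.2.1 ++ [(c, st.1.getD b.2.2 0)], st.2.2.2 + b.1)

def assign_customers_to_representatives_alt (customers : List Int) (representatives : List Int) (availability : List Bool) : Int × (List (Int × Int)) :=
  let init := pvInit representatives availability
  let fin := customers.foldl pvStepB (init.1, init.2, [], 0)
  (fin.2.2.2, fin.2.2.1)

-- ===== PRECONDITION & SPEC =====
-- Pre_ excludes inputs with len(availability) < len(representatives): A indexes availability[idx]
-- for every representative index as soon as there is a customer (IndexError), and B builds its
-- availability-filtered pool up front, so it raises there even when customers == [] — the one
-- corner where A still returns (0, []).
def Pre_assign_customers_to_representatives (customers : List Int) (representatives : List Int) (availability : List Bool) : Prop :=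
  representatives.length ≤ availability.length
instance (customers : List Int) (representatives : List Int) (availability : List Bool) : Decidable (Pre_assign_customers_to_representatives customers representatives availability) := by unfold Pre_assign_customers_to_representatives; infer_instance
def pvWitness_assign_customers_to_representatives : List Int × List Int × List Bool := ([2, -1], [5, 0, 2], [true, true, false])

def Spec_assign_customers_to_representatives (customers : List Int) (representatives : List Int) (availability : List Bool) (out : Int × (List (Int × Int))) : Prop := out = assign_customers_to_representatives_alt customers representatives availability
instance (customers : List Int) (representatives : List Int) (availability : List Bool) (out : Int × (List (Int × Int))) : Decidable (Spec_assign_customers_to_representatives customers representatives availability out) := by unfold Spec_assign_customers_to_representatives; infer_instance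

-- ===== CLAIM (what is proved, stated in full; the proofs are below) =====
def Claim_equal_assign_customers_to_representatives : Prop := ∀ (customers : List Int) (representatives : List Int) (availability : List Bool), Dom_assign_customers_to_representatives customers representatives availability → Pre_assign_customers_to_representatives customers representatives availability → Spec_assign_customers_to_representatives customers representatives availability (assign_customers_to_representatives customers representatives availability)

-- ===== LEMMAS AND PROOFS =====

-- lexicographic ≤ on (distance, rep index) — the order A's inner scan minimises
def pvKle : Int × Int → Int × Int → Prop := fun a b => a.1 < b.1 ∨ (a.1 = b.1 ∧ a.2 ≤ b.2)
-- strict lexicographic order on (value, rep index) — the order of B's pool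
def pvPlex : Int × Int → Int × Int → Prop := fun a b => a.1 < b.1 ∨ (a.1 = b.1 ∧ a.2 < b.2)
-- the key A minimises for customer c over a candidate (value, index) pair
def pvKey (c : Int) (q : Int × Int) : Int × Int := (|c - q.1|, q.2)
-- the (value, index) pairs still assignable given the used set
def pvCand (reps : List Int) (avail : List Bool) (used : PySem.Set Int) : List (Int × Int) :=
  (PySem.List.enumerate reps 0).filterMap (fun p =>
    if PySem.List.pyGetD avail p.1 false && !(PySem.Set.contains used p.1) then some (p.2, p.1) else none)
-- A's inner-scan accumulator update, on keys
def pvMinStep (best : Option (Int × Int)) (q : Int × Int) : Option (Int × Int) :=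
  match best with
  | none => some q
  | some b => if q.1 < b.1 then some q else some b

lemma pvKle_trans {a b c : Int × Int} (h1 : pvKle a b) (h2 : pvKle b c) : pvKle a c := by
  unfold pvKle at *; omega

lemma pvKle_antisymm {a b : Int × Int} (h1 : pvKle a b) (h2 : pvKle b a) : a = b := by
  unfold pvKle at *
  have : a.1 = b.1 ∧ a.2 = b.2 := by omega
  exact Prod.ext this.1 this.2

-- A's inner scan over enumerate(representatives) is the min-fold over the keys of the candidates
lemma pvInnerA (c : Int) (reps : List Int) (avail : List Bool) (used : PySem.Set Int) :
    (PySem.List.enumerate reps 0).foldl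
      (fun (best : Option (Int × Int)) p =>
        if PySem.List.pyGetD avail p.1 false && !(PySem.Set.contains used p.1) then
          match best with
          | none => some (|c - p.2|, p.1)
          | some b => if |c - p.2| < b.1 then some (|c - p.2|, p.1) else some b
        else best) none
      = ((pvCand reps avail used).map (pvKey c)).foldl pvMinStep none := by
  rw [List.foldl_map]
  unfold pvCand
  rw [List.foldl_filterMap]
  congr 1
  funext best p
  cases hb : (PySem.List.pyGetD avail p.1 false && !(PySem.Set.contains used p.1)) <;>
    cases best <;> simp [hb, pvMinStep, pvKey]

lemma pvMinGo : ∀ (l : List (Int × Int)) (a : Int × Int),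
    (∀ x ∈ l, a.2 < x.2) → l.Pairwise (fun p q => p.2 < q.2) →
    ∃ b, l.foldl pvMinStep (some a) = some b ∧ b ∈ a :: l ∧ ∀ x ∈ a :: l, pvKle b x := by
  intro l
  induction l with
  | nil =>
    intro a _ _
    exact ⟨a, rfl, List.mem_singleton.mpr rfl, by
      intro x hx
      rw [List.mem_singleton] at hx
      subst hx
      exact Or.inr ⟨rfl, le_refl _⟩⟩
  | cons x t ih =>
    intro a ha hpw
    have hxt : ∀ y ∈ t, x.2 < y.2 := (List.pairwise_cons.mp hpw).1
    have hat : ∀ y ∈ t, a.2 < y.2 := fun y hy => ha y (List.mem_cons_of_mem _ hy)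
    have hpt : t.Pairwise (fun p q => p.2 < q.2) := (List.pairwise_cons.mp hpw).2
    have hax : a.2 < x.2 := ha x List.mem_cons_self
    rw [List.foldl_cons]
    show ∃ b, t.foldl pvMinStep (pvMinStep (some a) x) = some b ∧ _
    have hstep : pvMinStep (some a) x = if x.1 < a.1 then some x else some a := rfl
    rw [hstep]
    by_cases h : x.1 < a.1
    · rw [if_pos h]
      obtain ⟨b, hfold, hmem, hmin⟩ := ih x hxt hpt
      refine ⟨b, hfold, List.mem_cons_of_mem _ hmem, ?_⟩
      intro y hy
      rcases List.mem_cons.mp hy with rfl | hy'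
      · have hbx : pvKle b x := hmin x List.mem_cons_self
        unfold pvKle at hbx ⊢; omega
      · exact hmin y hy'
    · rw [if_neg h]
      obtain ⟨b, hfold, hmem, hmin⟩ := ih a hat hpt
      refine ⟨b, hfold, ?_, ?_⟩
      · rcases List.mem_cons.mp hmem with rfl | hm
        · exact List.mem_cons_self
        · exact List.mem_cons_of_mem _ (List.mem_cons_of_mem _ hm)
      · intro y hy
        rcases List.mem_cons.mp hy with rfl | hy'
        · exact hmin y List.mem_cons_self
        rcases List.mem_cons.mp hy' with rfl | hy''
        · have hba : pvKle b a := hmin a List.mem_cons_self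
          unfold pvKle at hba ⊢; omega
        · exact hmin y (List.mem_cons_of_mem _ hy'')

lemma pvMinFold (l : List (Int × Int)) (hpw : l.Pairwise (fun p q => p.2 < q.2)) (hne : l ≠ []) :
    ∃ b, l.foldl pvMinStep none = some b ∧ b ∈ l ∧ ∀ x ∈ l, pvKle b x := by
  match l, hne with
  | q :: t, _ =>
    rw [List.foldl_cons]
    show ∃ b, t.foldl pvMinStep (some q) = some b ∧ _
    exact pvMinGo t q (List.pairwise_cons.mp hpw).1 (List.pairwise_cons.mp hpw).2

lemma pvCand_pairwise (reps : List Int) (avail : List Bool) (used : PySem.Set Int) :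
    (pvCand reps avail used).Pairwise (fun p q => p.2 < q.2) := by
  unfold pvCand
  rw [List.pairwise_filterMap]
  refine (PySem.List.pairwise_lt_enumerate reps 0).imp ?_
  intro a a' h b hb b' hb'
  by_cases c1 : (PySem.List.pyGetD avail a.1 false && !(PySem.Set.contains used a.1)) = true
  · rw [if_pos c1] at hb
    by_cases c2 : (PySem.List.pyGetD avail a'.1 false && !(PySem.Set.contains used a'.1)) = true
    · rw [if_pos c2] at hb'
      simp only [Option.some.injEq] at hb hb'
      subst hb; subst hb'
      exact h
    · rw [if_neg c2] at hb'; simp at hb'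
  · rw [if_neg c1] at hb; simp at hb

lemma pvCand_mem {reps : List Int} {avail : List Bool} {used : PySem.Set Int} {q : Int × Int}
    (h : q ∈ pvCand reps avail used) :
    ∃ k : Nat, ∃ hk : k < reps.length, q = (reps[k], (k : Int)) := by
  unfold pvCand at h
  rw [List.mem_filterMap] at h
  obtain ⟨p, hp, hpq⟩ := h
  rw [PySem.List.mem_enumerate_iff] at hp
  obtain ⟨k, hk, rfl⟩ := hp
  split at hpq
  · refine ⟨k, hk, ?_⟩
    simp only [Option.some.injEq] at hpq
    subst hpq
    simp
  · exact absurd hpq (by simp)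

-- B's pick returns the key-minimal pool entry together with its position
lemma pvPick_spec (pool : List (Int × Int)) (c : Int)
    (hs : pool.Pairwise pvPlex) (hne : pool ≠ []) :
    ∃ (k : Nat) (hk : k < pool.length),
      pvPick (pool.map (·.1)) pool c = some (|c - pool[k].1|, pool[k].2, k) ∧
      ∀ q ∈ pool, pvKle (|c - pool[k].1|, pool[k].2) (|c - q.1|, q.2) := by
  have hlen0 : 0 < pool.length := List.length_pos_of_ne_nil hne
  have hvpw : (pool.map (·.1)).Pairwise (· ≤ ·) := by
    rw [List.pairwise_map]
    exact hs.imp (fun h => by unfold pvPlex at h; omega)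
  obtain ⟨hj1, hjlt, hjge⟩ := PySem.List.bisectLeft_spec (pool.map (·.1)) c hvpw
  set j := PySem.List.bisectLeft (pool.map (·.1)) c with hjdef
  have hj1' : j ≤ pool.length := by simpa using hj1
  have hpg := List.pairwise_iff_getElem.mp hs
  have hmono : ∀ (t u : Nat) (ht : t < pool.length) (hu : u < pool.length), t ≤ u →
      pool[t].1 ≤ pool[u].1 := by
    intro t u ht hu htu
    rcases Nat.eq_or_lt_of_le htu with rfl | h
    · exact le_refl _
    · have := hpg t u ht hu h; unfold pvPlex at this; omega
  have htie : ∀ (t u : Nat) (ht : t < pool.length) (hu : u < pool.length), t < u →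
      pool[t].1 = pool[u].1 → pool[t].2 < pool[u].2 := by
    intro t u ht hu htu he
    have := hpg t u ht hu htu; unfold pvPlex at this; omega
  have hjlt' : ∀ (t : Nat) (ht : t < pool.length), t < j → pool[t].1 < c := by
    intro t ht h
    have := hjlt t (by simpa using ht) h
    simpa using this
  have hjge' : ∀ (t : Nat) (ht : t < pool.length), j ≤ t → c ≤ pool[t].1 := by
    intro t ht h
    have := hjge t (by simpa using ht) h
    simpa using this
  -- successor candidate is key-minimal on positions ≥ j
  have hsucc : ∀ (hjl : j < pool.length) (t : Nat) (ht : t < pool.length), j ≤ t →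
      pvKle (|c - pool[j].1|, pool[j].2) (|c - pool[t].1|, pool[t].2) := by
    intro hjl t ht hjt
    have h1 : c ≤ pool[t].1 := hjge' t ht hjt
    have h1j : c ≤ pool[j].1 := hjge' j hjl (le_refl _)
    have h2 : pool[j].1 ≤ pool[t].1 := hmono j t hjl ht hjt
    have habs : |c - pool[t].1| = pool[t].1 - c := by rw [abs_sub_comm]; exact abs_of_nonneg (by omega)
    have habsj : |c - pool[j].1| = pool[j].1 - c := by rw [abs_sub_comm]; exact abs_of_nonneg (by omega)
    rw [habs, habsj]
    rcases lt_or_eq_of_le h2 with h | h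
    · exact Or.inl (by omega)
    · rcases Nat.eq_or_lt_of_le hjt with rfl | hlt
      · exact Or.inr ⟨by omega, le_refl _⟩
      · exact Or.inr ⟨by omega, le_of_lt (htie j t hjl ht hlt h)⟩
  have habsj : ∀ (hjl : j < pool.length), |c - pool[j].1| = pool[j].1 - c := by
    intro hjl
    have := hjge' j hjl (le_refl _)
    rw [abs_sub_comm]; exact abs_of_nonneg (by omega)
  have hb0 : ∀ (hjl : j < pool.length), pvBest0 (pool.map (·.1)) pool c j = some (pool[j].1 - c, pool[j].2, j) := by
    intro hjl
    unfold pvBest0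
    rw [List.getElem?_eq_getElem (by simpa using hjl), List.getElem?_eq_getElem hjl]
    simp
  have hb0' : j = pool.length → pvBest0 (pool.map (·.1)) pool c j = none := by
    intro hjl
    unfold pvBest0
    rw [List.getElem?_eq_none (by simp [hjl])]
  by_cases hj0 : j = 0
  · -- only the successor candidate; it is minimal over the whole pool
    have hjl : j < pool.length := by omega
    refine ⟨j, hjl, ?_, ?_⟩
    · show pvPick (pool.map (·.1)) pool c = _
      unfold pvPick
      rw [← hjdef, if_pos hj0, hb0 hjl, habsj hjl]
    · intro q hq
      obtain ⟨t, ht, rfl⟩ := List.mem_iff_getElem.mp hq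
      exact hsucc hjl t ht (by omega)
  · -- predecessor candidate exists
    have hj1l : j - 1 < pool.length := by omega
    have hvp : pool[j-1].1 < c := hjlt' (j-1) hj1l (by omega)
    obtain ⟨hk1, hklt, hkge⟩ := PySem.List.bisectLeft_spec (pool.map (·.1)) (pool[j-1].1) hvpw
    set k := PySem.List.bisectLeft (pool.map (·.1)) (pool[j-1].1) with hkdef
    have hkj : k ≤ j - 1 := by
      by_contra hcon
      have := hklt (j-1) (by simpa using hj1l) (by omega)
      simp only [List.getElem_map] at this
      omega
    have hkl : k < pool.length := by omega
    have hvk : pool[k].1 = pool[j-1].1 := by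
      have hge := hkge k (by simpa using hkl) (le_refl _)
      simp only [List.getElem_map] at hge
      have hle := hmono k (j-1) hkl hj1l hkj
      omega
    have habsk : |c - pool[k].1| = c - pool[j-1].1 := by
      rw [hvk]
      exact abs_of_nonneg (by omega)
    -- predecessor candidate is key-minimal on positions < j
    have hpred : ∀ (t : Nat) (ht : t < pool.length), t < j →
        pvKle (|c - pool[k].1|, pool[k].2) (|c - pool[t].1|, pool[t].2) := by
      intro t ht htj
      have h1 : pool[t].1 < c := hjlt' t ht htj
      have habst : |c - pool[t].1| = c - pool[t].1 := abs_of_nonneg (by omega)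
      have h2 : pool[t].1 ≤ pool[j-1].1 := hmono t (j-1) ht hj1l (by omega)
      rw [habsk, habst]
      rcases lt_or_eq_of_le h2 with h | h
      · exact Or.inl (by omega)
      · have htk : k ≤ t := by
          by_contra hcon
          have := hklt t (by simpa using ht) (by omega)
          simp only [List.getElem_map] at this
          omega
        rcases Nat.eq_or_lt_of_le htk with rfl | hlt
        · exact Or.inr ⟨by omega, le_refl _⟩
        · exact Or.inr ⟨by omega, le_of_lt (htie k t hkl ht hlt (by omega))⟩
    have hsome : ((pool.map (·.1))[j-1]? : Option Int) = some (pool[j-1].1) := by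
      rw [List.getElem?_eq_getElem (by simpa using hj1l)]
      simp
    have hsomek : ((pool.map (·.1))[k]? : Option Int) = some (pool[k].1) := by
      rw [List.getElem?_eq_getElem (by simpa using hkl)]
      simp
    have hsomepk : (pool[k]? : Option (Int × Int)) = some pool[k] :=
      List.getElem?_eq_getElem hkl
    rcases Nat.lt_or_ge j pool.length with hjl | hjl
    · -- both candidates; B compares them with the (distance, index) tie-break
      by_cases hcmp : c - pool[k].1 < pool[j].1 - c ∨ (c - pool[k].1 = pool[j].1 - c ∧ pool[k].2 < pool[j].2)
      · refine ⟨k, hkl, ?_, ?_⟩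
        · show pvPick (pool.map (·.1)) pool c = _
          unfold pvPick
          rw [← hjdef, if_neg hj0, hsome]
          simp only []
          rw [← hkdef, hsomek, hsomepk]
          simp only []
          rw [hb0 hjl]
          simp only []
          rw [if_pos hcmp]
          rw [habsk, hvk]
        · intro q hq
          obtain ⟨t, ht, rfl⟩ := List.mem_iff_getElem.mp hq
          rcases Nat.lt_or_ge t j with htj | htj
          · exact hpred t ht htj
          · refine pvKle_trans ?_ (hsucc hjl t ht htj)
            unfold pvKle
            rw [habsk, habsj hjl]
            omega
      · refine ⟨j, hjl, ?_, ?_⟩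
        · show pvPick (pool.map (·.1)) pool c = _
          unfold pvPick
          rw [← hjdef, if_neg hj0, hsome]
          simp only []
          rw [← hkdef, hsomek, hsomepk]
          simp only []
          rw [hb0 hjl]
          simp only []
          rw [if_neg hcmp, habsj hjl]
        · intro q hq
          obtain ⟨t, ht, rfl⟩ := List.mem_iff_getElem.mp hq
          rcases Nat.lt_or_ge t j with htj | htj
          · refine pvKle_trans ?_ (hpred t ht htj)
            unfold pvKle
            rw [habsk, habsj hjl]
            omega
          · exact hsucc hjl t ht htj
    · -- no successor: the predecessor candidate is minimal over the whole pool
      have hjlen : j = pool.length := by omega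
      refine ⟨k, hkl, ?_, ?_⟩
      · show pvPick (pool.map (·.1)) pool c = _
        unfold pvPick
        rw [← hjdef, if_neg hj0, hsome]
        simp only []
        rw [← hkdef, hsomek, hsomepk]
        simp only []
        rw [hb0' hjlen]
        simp only []
        rw [habsk, hvk]
      · intro q hq
        obtain ⟨t, ht, rfl⟩ := List.mem_iff_getElem.mp hq
        exact hpred t ht (by omega)

-- erasing the element at position k is filtering its (unique) index away
lemma pvEraseFilter : ∀ (pool : List (Int × Int)) (k : Nat) (v i : Int),
    pool[k]? = some (v, i) → (pool.map (·.2)).Nodup →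
    pool.eraseIdx k = pool.filter (fun q => q.2 != i) := by
  intro pool
  induction pool with
  | nil => intro k v i h _; simp at h
  | cons p t ih =>
    intro k v i h hnd
    match k with
    | 0 =>
      simp only [List.getElem?_cons_zero, Option.some.injEq] at h
      subst h
      simp only [List.eraseIdx_zero, List.tail_cons, List.filter_cons]
      rw [if_neg (by simp)]
      rw [List.filter_eq_self.mpr]
      intro q hq
      simp only [List.map_cons, List.nodup_cons] at hnd
      have : q.2 ∈ t.map (·.2) := List.mem_map_of_mem hq
      simp only [bne_iff_ne, ne_eq]
      intro hqi
      exact hnd.1 (by rwa [← hqi])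
    | k + 1 =>
      simp only [List.getElem?_cons_succ] at h
      simp only [List.map_cons, List.nodup_cons] at hnd
      have hvi : (v, i) ∈ t := List.mem_of_getElem? h
      have hpi : p.2 ≠ i := by
        intro hq
        exact hnd.1 (hq ▸ List.mem_map_of_mem hvi)
      rw [List.eraseIdx_cons_succ, List.filter_cons, if_pos (by simpa using hpi)]
      rw [ih k v i h hnd.2]

lemma pvContains_add (s : PySem.Set Int) (x y : Int) :
    PySem.Set.contains (PySem.Set.add s x) y = (PySem.Set.contains s y || y == x) := by
  rw [Bool.eq_iff_iff]
  simp [PySem.Set.mem_add]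

lemma pvCand_add (reps : List Int) (avail : List Bool) (used : PySem.Set Int) (i : Int) :
    pvCand reps avail (PySem.Set.add used i) = (pvCand reps avail used).filter (fun q => q.2 != i) := by
  unfold pvCand
  rw [List.filter_filterMap]
  congr 1
  funext p
  rw [pvContains_add]
  cases ha : PySem.List.pyGetD avail p.1 false <;>
    cases hu : PySem.Set.contains used p.1 <;>
      cases hi : p.1 == i <;>
        simp [Option.filter, bne, hi]

lemma pvCand_empty (reps : List Int) (avail : List Bool) :
    pvCand reps avail PySem.Set.empty =
      (PySem.List.enumerate reps 0).filterMap
        (fun p => if PySem.List.pyGetD avail p.1 false then some (p.2, p.1) else none) := by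
  unfold pvCand
  congr 1
  funext p
  have : PySem.Set.contains (PySem.Set.empty : PySem.Set Int) p.1 = false := by
    rw [← Bool.not_eq_true, PySem.Set.contains_iff]
    simp [PySem.Set.empty]
  simp [this]

-- the build loop of B: sorted insertion of each available (value, index)
lemma pvBuildAux (avail : List Bool) :
    ∀ (l : List (Int × Int)) (pool : List (Int × Int)),
      l.Pairwise (fun p q => p.1 < q.1) →
      pool.Pairwise pvPlex →
      (∀ q ∈ pool, ∀ p ∈ l, q.2 < p.1) →
      ∃ pool',
        l.foldl (fun (vp : List Int × List (Int × Int)) p =>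
          if PySem.List.pyGetD avail p.1 false then
            let k := PySem.List.bisectRight vp.1 p.2
            (PySem.List.insert vp.1 (k : Int) p.2, PySem.List.insert vp.2 (k : Int) (p.2, p.1))
          else vp) (pool.map (·.1), pool)
        = (pool'.map (·.1), pool') ∧
        pool'.Pairwise pvPlex ∧
        pool'.Perm (pool ++ l.filterMap (fun p => if PySem.List.pyGetD avail p.1 false then some (p.2, p.1) else none)) := by
  intro l
  induction l with
  | nil =>
    intro pool _ hpw _
    exact ⟨pool, rfl, hpw, by simp⟩
  | cons p t ih =>
    intro pool hl hpw hbound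
    simp only [List.foldl_cons]
    by_cases ha : PySem.List.pyGetD avail p.1 false
    · rw [if_pos ha]
      have hvpw : (pool.map (·.1)).Pairwise (· ≤ ·) := by
        rw [List.pairwise_map]
        exact hpw.imp (fun h => by unfold pvPlex at h; omega)
      obtain ⟨hk1, hklt, hkge⟩ := PySem.List.bisectRight_spec (pool.map (·.1)) p.2 hvpw
      set k := PySem.List.bisectRight (pool.map (·.1)) p.2 with hkdef
      have hklen : k ≤ pool.length := by simpa using hk1
      have hins1 : PySem.List.insert (pool.map (·.1)) ((k : Nat) : Int) p.2
          = (pool.take k ++ (p.2, p.1) :: pool.drop k).map (·.1) := by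
        rw [PySem.List.insert_natCast _ _ _ (by simpa using hk1)]
        simp [List.map_take, List.map_drop]
      have hins2 : PySem.List.insert pool ((k : Nat) : Int) (p.2, p.1)
          = pool.take k ++ (p.2, p.1) :: pool.drop k :=
        PySem.List.insert_natCast _ _ _ hklen
      set newpool := pool.take k ++ (p.2, p.1) :: pool.drop k with hnp
      -- elements of the two halves
      have htake : ∀ a ∈ pool.take k, a.1 ≤ p.2 ∧ a ∈ pool := by
        intro a haa
        constructor
        · obtain ⟨u, hu, hua⟩ := List.mem_take_iff_getElem.mp haa
          have hu1 : u < k := lt_of_lt_of_le hu (by omega)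
          have hu2 : u < pool.length := lt_of_lt_of_le hu (by omega)
          have := hklt u (by simpa using hu2) hu1
          simp only [List.getElem_map] at this
          rw [← hua]
          exact this
        · exact List.mem_of_mem_take haa
      have hdrop : ∀ b ∈ pool.drop k, p.2 < b.1 ∧ b ∈ pool := by
        intro b hbb
        constructor
        · obtain ⟨u, hu2, hub⟩ := List.mem_drop_iff_getElem.mp hbb
          have := hkge (k + u) (by simp; omega) (by omega)
          simp only [List.getElem_map] at this
          rw [← hub]
          exact this
        · exact List.mem_of_mem_drop hbb
      -- pairwise on the new pool
      have hsplit : pool.take k ++ pool.drop k = pool := List.take_append_drop k pool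
      have hpw2 := hsplit ▸ hpw
      obtain ⟨hpwt, hpwd, hcross⟩ := List.pairwise_append.mp hpw2
      have hnewpw : newpool.Pairwise pvPlex := by
        rw [hnp, List.pairwise_append]
        refine ⟨hpwt, ?_, ?_⟩
        · rw [List.pairwise_cons]
          refine ⟨?_, hpwd⟩
          intro b hbb
          exact Or.inl (hdrop b hbb).1
        · intro a haa b hbb
          rcases List.mem_cons.mp hbb with rfl | hbd
          · rcases lt_or_eq_of_le (htake a haa).1 with h | h
            · exact Or.inl h
            · exact Or.inr ⟨h, hbound a (htake a haa).2 p List.mem_cons_self⟩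
          · exact hcross a haa b hbd
      -- bound for the tail
      have hnewbound : ∀ q ∈ newpool, ∀ p' ∈ t, q.2 < p'.1 := by
        intro q hq p' hp'
        rw [hnp, List.mem_append, List.mem_cons] at hq
        rcases hq with hq | hq | hq
        · exact hbound q (htake q hq).2 p' (List.mem_cons_of_mem _ hp')
        · rw [hq]
          exact (List.pairwise_cons.mp hl).1 p' hp'
        · exact hbound q (hdrop q hq).2 p' (List.mem_cons_of_mem _ hp')
      obtain ⟨pool', h1, h2, h3⟩ := ih newpool (List.pairwise_cons.mp hl).2 hnewpw hnewbound
      refine ⟨pool', ?_, h2, ?_⟩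
      · rw [hins1, hins2]
        exact h1
      · have hmid : newpool.Perm ((p.2, p.1) :: pool) := by
          rw [hnp]
          conv_rhs => rw [← hsplit]
          exact List.perm_middle
        have hfm : (p :: t).filterMap (fun p => if PySem.List.pyGetD avail p.1 false then some (p.2, p.1) else none)
            = (p.2, p.1) :: t.filterMap (fun p => if PySem.List.pyGetD avail p.1 false then some (p.2, p.1) else none) := by
          rw [List.filterMap_cons_some (by rw [if_pos ha])]
        rw [hfm]
        refine h3.trans ?_
        refine (hmid.append_right _).trans ?_
        exact List.perm_middle.symm
    · rw [if_neg ha]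
      obtain ⟨pool', h1, h2, h3⟩ := ih pool (List.pairwise_cons.mp hl).2 hpw
        (fun q hq p' hp' => hbound q hq p' (List.mem_cons_of_mem _ hp'))
      refine ⟨pool', h1, h2, ?_⟩
      have hfm : (p :: t).filterMap (fun p => if PySem.List.pyGetD avail p.1 false then some (p.2, p.1) else none)
          = t.filterMap (fun p => if PySem.List.pyGetD avail p.1 false then some (p.2, p.1) else none) := by
        rw [List.filterMap_cons_none (by rw [if_neg ha])]
      rw [hfm]
      exact h3

lemma pvBuild (reps : List Int) (avail : List Bool) :
    ∃ pool, pvInit reps avail = (pool.map (·.1), pool) ∧ pool.Pairwise pvPlex ∧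
      pool.Perm (pvCand reps avail PySem.Set.empty) := by
  obtain ⟨pool', h1, h2, h3⟩ := pvBuildAux avail (PySem.List.enumerate reps 0) []
    (PySem.List.pairwise_lt_enumerate reps 0) List.Pairwise.nil (by simp)
  refine ⟨pool', ?_, h2, ?_⟩
  · unfold pvInit
    simpa using h1
  · rw [pvCand_empty]
    simpa using h3

-- the serve loops of A and B stay in lockstep
lemma pvLoop (reps : List Int) (avail : List Bool) :
    ∀ (cs : List Int) (used : PySem.Set Int) (pool : List (Int × Int)) (acc : List (Int × Int)) (tot : Int),
      pool.Pairwise pvPlex → pool.Perm (pvCand reps avail used) →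
      (cs.foldl (pvStepA reps avail) (used, acc, tot)).2
        = (cs.foldl pvStepB (pool.map (·.1), pool, acc, tot)).2.2 := by
  intro cs
  induction cs with
  | nil => intro used pool acc tot _ _; rfl
  | cons c cs ih =>
    intro used pool acc tot hpw hperm
    rw [List.foldl_cons, List.foldl_cons]
    by_cases hpool : pool = []
    · subst hpool
      have hcand : pvCand reps avail used = [] := hperm.symm.eq_nil
      have hA : pvStepA reps avail (used, acc, tot) c = (used, acc, tot) := by
        unfold pvStepA
        rw [pvInnerA c reps avail used, hcand]
        rfl
      have hB : pvStepB ((List.nil (α := Int × Int)).map (·.1), [], acc, tot) c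
          = ((List.nil (α := Int × Int)).map (·.1), [], acc, tot) := by
        unfold pvStepB
        rfl
      rw [hA, hB]
      exact ih used [] acc tot hpw hperm
    · have hcne : pvCand reps avail used ≠ [] := by
        intro h
        exact hpool (by rw [h] at hperm; exact hperm.eq_nil)
      obtain ⟨k, hk, hpick, hmin⟩ := pvPick_spec pool c hpw hpool
      -- A's inner scan: the key-minimal candidate
      have hkeys_pw : ((pvCand reps avail used).map (pvKey c)).Pairwise (fun p q => p.2 < q.2) := by
        rw [List.pairwise_map]
        exact pvCand_pairwise reps avail used
      have hkeysne : (pvCand reps avail used).map (pvKey c) ≠ [] := by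
        simpa using hcne
      obtain ⟨bA, hfold, hbmem, hbmin⟩ := pvMinFold _ hkeys_pw hkeysne
      have hkmem : pool[k] ∈ pool := List.getElem_mem hk
      have hkcand : pool[k] ∈ pvCand reps avail used := hperm.mem_iff.mp hkmem
      have h1 : pvKle bA (pvKey c pool[k]) := hbmin _ (List.mem_map_of_mem hkcand)
      have h2 : pvKle (pvKey c pool[k]) bA := by
        obtain ⟨q, hq, rfl⟩ := List.mem_map.mp hbmem
        exact hmin q (hperm.mem_iff.mpr hq)
      have hbeq : bA = (|c - pool[k].1|, pool[k].2) := pvKle_antisymm h1 h2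
      -- the value A appends is pool[k].1
      obtain ⟨k', hk', hke⟩ := pvCand_mem hkcand
      have hval : PySem.List.pyGetD reps pool[k].2 0 = pool[k].1 := by
        rw [hke]
        simp only [PySem.List.pyGetD_natCast]
        exact List.getD_eq_getElem reps 0 hk'
      -- one step of A
      have hA : pvStepA reps avail (used, acc, tot) c
          = (PySem.Set.add used pool[k].2, acc ++ [(c, pool[k].1)], tot + |c - pool[k].1|) := by
        unfold pvStepA
        rw [pvInnerA c reps avail used, hfold, hbeq]
        simp [hval]
      -- one step of B
      have hB : pvStepB (pool.map (·.1), pool, acc, tot) c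
          = ((pool.map (·.1)).eraseIdx k, pool.eraseIdx k, acc ++ [(c, pool[k].1)], tot + |c - pool[k].1|) := by
        unfold pvStepB
        rw [if_neg (by simp [hpool])]
        rw [show (pool.map (·.1), pool, acc, tot).1 = pool.map (·.1) from rfl]
        rw [show (pool.map (·.1), pool, acc, tot).2.1 = pool from rfl]
        rw [hpick]
        simp [List.getElem?_eq_getElem hk]
      rw [hA, hB]
      -- the new pool is the candidate list of the new used set
      have hvals' : (pool.map (·.1)).eraseIdx k = (pool.eraseIdx k).map (·.1) := by
        rw [List.eraseIdx_map]
      have hpw' : (pool.eraseIdx k).Pairwise pvPlex :=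
        hpw.sublist (List.eraseIdx_sublist pool k)
      have hnodup : (pool.map (·.2)).Nodup := by
        refine ((hperm.map (·.2)).nodup_iff).mpr ?_
        have := pvCand_pairwise reps avail used
        exact List.Pairwise.imp ne_of_lt ((List.pairwise_map).mpr this)
      have hperm' : (pool.eraseIdx k).Perm (pvCand reps avail (PySem.Set.add used pool[k].2)) := by
        rw [pvCand_add]
        rw [pvEraseFilter pool k pool[k].1 pool[k].2
          (by rw [List.getElem?_eq_getElem hk]) hnodup]
        exact hperm.filter _
      rw [hvals']
      exact ih (PySem.Set.add used pool[k].2) (pool.eraseIdx k) (acc ++ [(c, pool[k].1)])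
        (tot + |c - pool[k].1|) hpw' hperm'

theorem assign_customers_to_representatives_spec : Claim_equal_assign_customers_to_representatives := by
  intro customers reps avail _ _
  show _ = _
  unfold assign_customers_to_representatives assign_customers_to_representatives_alt
  obtain ⟨pool0, hinit, hpw, hperm⟩ := pvBuild reps avail
  rw [hinit]
  have h := pvLoop reps avail customers PySem.Set.empty pool0 [] 0 hpw hperm
  have h1 := congrArg Prod.fst h
  have h2 := congrArg Prod.snd h
  simp only at h1 h2
  simp only [h1, h2]
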